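-- pv_equiv track=rewrite | github.com/anniebryan/advent-of-code-19 | 2020/day4/solution.py | get_all_passports
-- ===== SOURCE A (Python) =====
-- def get_all_passports(puzzle_input):
--     all_passports = []
--     passport = []
--     for line in puzzle_input:
--         if line == "":
--             # break between passports
--             all_passports.append(passport)
--             passport = []
--         else:
--             # continuation of current passport
--             passport.extend(line.split())
--     all_passports.append(passport)
--     return all_passports
-- ===== SOURCE B (Python) =====
-- def get_all_passports(puzzle_input):
--     # Recursive split at the first blank line, instead of a streaming accumulator.
--     if "" not in puzzle_input:
--         return [[tok for line in puzzle_input for tok in line.split()]]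
--     i = puzzle_input.index("")
--     head = [tok for line in puzzle_input[:i] for tok in line.split()]
--     return [head] + get_all_passports(puzzle_input[i + 1:])
-- ===== Notes on version B (the rewrite author's own statement) =====
-- stated objective: alternative
-- what changed: Replaces A's single streaming loop with a mutable (all_passports, passport) accumulator pair by a recursive divide-at-the-first-blank-line decomposition: find the first blank, flatten the slice before it with a nested comprehension, and recurse on the slice after it.
import Mathlib
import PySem

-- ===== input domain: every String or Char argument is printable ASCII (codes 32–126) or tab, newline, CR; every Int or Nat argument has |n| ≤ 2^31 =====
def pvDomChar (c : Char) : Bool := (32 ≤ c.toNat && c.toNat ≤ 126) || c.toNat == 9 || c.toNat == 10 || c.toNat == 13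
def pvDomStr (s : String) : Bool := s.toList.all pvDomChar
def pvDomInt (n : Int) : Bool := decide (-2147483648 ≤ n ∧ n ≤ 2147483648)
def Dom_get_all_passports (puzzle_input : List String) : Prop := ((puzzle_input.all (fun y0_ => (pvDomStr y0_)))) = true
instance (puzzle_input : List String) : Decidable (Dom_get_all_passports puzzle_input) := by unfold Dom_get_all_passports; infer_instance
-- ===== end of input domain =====

-- ===== PORT A =====
-- One honest line: B splits the input recursively at the first blank line instead of A's streaming accumulator; same result, same cost.
def get_all_passports (puzzle_input : List String) : List (List String) :=
  let st := puzzle_input.foldl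
    (fun (st : List (List String) × List String) line =>
      if line == "" then (st.1 ++ [st.2], ([] : List String))
      else (st.1, st.2 ++ PySem.Str.split₀ line))
    ([], [])
  st.1 ++ [st.2]

-- ===== PORT B =====
-- xs[:i] / xs[i+1:] with the nonnegative index i = xs.index("") are exactly take i / drop (i+1)
def get_all_passports_alt (puzzle_input : List String) : List (List String) :=
  if h : "" ∈ puzzle_input then
    let i := puzzle_input.idxOf ""
    ((puzzle_input.take i).flatMap (fun l => PySem.Str.split₀ l)) ::
      get_all_passports_alt (puzzle_input.drop (i + 1))
  else
    [puzzle_input.flatMap (fun l => PySem.Str.split₀ l)]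
termination_by puzzle_input.length
decreasing_by
  cases puzzle_input with
  | nil => cases h
  | cons a t => simp [List.length_drop]

-- ===== PRECONDITION & SPEC =====
def Spec_get_all_passports (puzzle_input : List String) (out : List (List String)) : Prop := out = get_all_passports_alt puzzle_input
instance (puzzle_input : List String) (out : List (List String)) : Decidable (Spec_get_all_passports puzzle_input out) := by unfold Spec_get_all_passports; infer_instance

-- ===== CLAIM (what is proved, stated in full; the proofs are below) =====
def Claim_equal_get_all_passports : Prop := ∀ (puzzle_input : List String), Dom_get_all_passports puzzle_input → Spec_get_all_passports puzzle_input (get_all_passports puzzle_input)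

-- ===== LEMMAS AND PROOFS =====

/-- Prefix the first group of a nonempty group list. -/
def pvPrepend (pp : List String) : List (List String) → List (List String)
  | [] => []
  | h :: t => (pp ++ h) :: t

theorem alt_ne_nil (xs : List String) : get_all_passports_alt xs ≠ [] := by
  rw [get_all_passports_alt]
  split <;> simp

theorem pvPrepend_nil {L : List (List String)} (h : L ≠ []) : pvPrepend [] L = L := by
  cases L with
  | nil => exact absurd rfl h
  | cons a t => simp [pvPrepend]

theorem pvPrepend_pvPrepend (pp q : List String) (L : List (List String)) :
    pvPrepend pp (pvPrepend q L) = pvPrepend (pp ++ q) L := by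
  cases L <;> simp [pvPrepend]

theorem alt_cons_blank (rest : List String) :
    get_all_passports_alt ("" :: rest) = [] :: get_all_passports_alt rest := by
  rw [get_all_passports_alt]
  simp

theorem alt_cons_ne (l : String) (rest : List String) (h : l ≠ "") :
    get_all_passports_alt (l :: rest) =
      pvPrepend (PySem.Str.split₀ l) (get_all_passports_alt rest) := by
  by_cases hm : "" ∈ rest
  · rw [get_all_passports_alt, get_all_passports_alt]
    have hmem : "" ∈ l :: rest := List.mem_cons_of_mem _ hm
    have hne : (l == "") = false := by simp [h]
    have hidx : (l :: rest).idxOf "" = rest.idxOf "" + 1 := by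
      simp [List.idxOf_cons, hne]
    simp only [hmem, hm, dif_pos]
    rw [hidx]
    simp [pvPrepend]
  · rw [get_all_passports_alt, get_all_passports_alt]
    have hmem : "" ∉ l :: rest := by
      intro hc
      rcases List.mem_cons.mp hc with hc | hc
      · exact h hc.symm
      · exact hm hc
    simp only [hmem, hm, dif_neg, not_false_iff]
    simp [pvPrepend]

theorem run_eq (xs : List String) : ∀ (acc : List (List String)) (pp : List String),
    (let st := xs.foldl
      (fun (st : List (List String) × List String) line =>
        if line == "" then (st.1 ++ [st.2], ([] : List String))
        else (st.1, st.2 ++ PySem.Str.split₀ line)) (acc, pp)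
     st.1 ++ [st.2]) = acc ++ pvPrepend pp (get_all_passports_alt xs) := by
  induction xs with
  | nil =>
    intro acc pp
    rw [get_all_passports_alt]
    simp [pvPrepend]
  | cons l rest ih =>
    intro acc pp
    by_cases hl : l = ""
    · subst hl
      simp only [List.foldl_cons, BEq.rfl, if_true]
      rw [ih (acc ++ [pp]) [], alt_cons_blank, pvPrepend_nil (alt_ne_nil rest)]
      simp [pvPrepend]
    · have : (l == "") = false := by simp [hl]
      simp only [List.foldl_cons, this, if_neg, Bool.false_eq_true, not_false_iff,
        alt_cons_ne l rest hl]
      rw [ih, pvPrepend_pvPrepend]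

-- ===== VERDICT (by name: the statement is the Claim_ definition above) =====
theorem get_all_passports_spec : Claim_equal_get_all_passports := by
  intro xs _
  unfold Spec_get_all_passports get_all_passports
  rw [run_eq xs [] []]
  simp [pvPrepend_nil (alt_ne_nil xs)]
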